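-- pv_equiv track=rewrite | github.com/cdkintegracia/web_app_4dk | web_app_4dk/modules/AddCallsAmountToTask.py | find_top_deal_type
-- ===== SOURCE A (Python) =====
-- def find_top_deal_type(deals):
--     sort_1 = [
--         'UC_XIYCTV',  # ПРОФ Земля+Помощник
--         'UC_5T4MAW',  # ПРОФ Земля+Облако+Помощник
--         'UC_2SJOEJ',  # ПРОФ Облако+Помощник
--         'UC_81T8ZR',  # АОВ
--         'UC_SV60SP',  # АОВ+Облако
--     ]
--     sort_2 = [
--         'UC_N113M9',  # ПРОФ Земля+Облако
--         'UC_ZKPT1B',  # ПРОФ Облако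
--         'UC_92H9MN',  # Индивидуальный,
--         'UC_7V8HWF',  # Индивидуальный+Облако
--         'UC_HT9G9H',  # ПРОФ Земля
--     ]
--     sort_3 = [
--         'UC_1UPOTU',  # ИТС Бесплатный
--     ]
--
--     for sort in sort_1:
--         for deal in deals:
--             if deal['TYPE_ID'] == sort:
--                 return deal
--     for sort in sort_2:
--         for deal in deals:
--             if deal['TYPE_ID'] == sort:
--                 return deal
--     for sort in sort_3:
--         for deal in deals:
--             if deal['TYPE_ID'] == sort:
--                 return deal
-- ===== SOURCE B (Python) =====
-- def find_top_deal_type(deals):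
--     sort_1 = [
--         'UC_XIYCTV',  # ПРОФ Земля+Помощник
--         'UC_5T4MAW',  # ПРОФ Земля+Облако+Помощник
--         'UC_2SJOEJ',  # ПРОФ Облако+Помощник
--         'UC_81T8ZR',  # АОВ
--         'UC_SV60SP',  # АОВ+Облако
--     ]
--     sort_2 = [
--         'UC_N113M9',  # ПРОФ Земля+Облако
--         'UC_ZKPT1B',  # ПРОФ Облако
--         'UC_92H9MN',  # Индивидуальный,
--         'UC_7V8HWF',  # Индивидуальный+Облако
--         'UC_HT9G9H',  # ПРОФ Земля
--     ]
--     sort_3 = [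
--         'UC_1UPOTU',  # ИТС Бесплатный
--     ]
--     priority = {t: i for i, t in enumerate(sort_1 + sort_2 + sort_3)}
--     best = None
--     best_rank = len(priority)
--     for deal in deals:
--         r = priority.get(deal['TYPE_ID'])
--         if r is not None and r < best_rank:
--             best = deal
--             best_rank = r
--     return best
-- ===== Notes on version B (the rewrite author's own statement) =====
-- stated objective: faster
-- what changed: Replaces A's 11 priority-ordered scans over the deal list by a precomputed TYPE_ID->rank dict and a single pass over the deals keeping the best (lowest-rank, first-seen) deal. Pre_ excludes deal lists in which some deal lacks the 'TYPE_ID' key: Python raises KeyError on such a deal, except that A can short-circuit on an earlier match and return before reaching it while B's single pass still raises.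
-- outside the precondition, e.g. on find_top_deal_type([{'TYPE_ID': 'UC_XIYCTV'}, {}]): A returns {'TYPE_ID': 'UC_XIYCTV'}, B raises KeyError
import Mathlib
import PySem

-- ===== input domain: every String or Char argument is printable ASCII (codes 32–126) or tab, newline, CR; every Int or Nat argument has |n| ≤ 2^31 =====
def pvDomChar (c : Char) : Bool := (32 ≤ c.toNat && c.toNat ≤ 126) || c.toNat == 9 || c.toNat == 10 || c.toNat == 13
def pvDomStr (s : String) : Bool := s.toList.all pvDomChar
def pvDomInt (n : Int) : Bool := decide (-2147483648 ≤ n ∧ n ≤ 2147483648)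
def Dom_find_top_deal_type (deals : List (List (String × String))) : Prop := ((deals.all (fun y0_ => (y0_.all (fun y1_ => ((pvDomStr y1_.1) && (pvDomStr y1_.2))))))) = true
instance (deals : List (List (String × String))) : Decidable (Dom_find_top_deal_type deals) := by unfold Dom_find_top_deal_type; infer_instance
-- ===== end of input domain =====

-- B replaces A's 11 priority-ordered scans of the deal list by a rank dict and a single pass keeping the best deal.

-- ===== PORT A =====
def pvSort1 : List String := ["UC_XIYCTV", "UC_5T4MAW", "UC_2SJOEJ", "UC_81T8ZR", "UC_SV60SP"]
def pvSort2 : List String := ["UC_N113M9", "UC_ZKPT1B", "UC_92H9MN", "UC_7V8HWF", "UC_HT9G9H"]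
def pvSort3 : List String := ["UC_1UPOTU"]
-- deal['TYPE_ID']: first-match dict lookup; the total `getD … ""` form is exact under Pre_ (key present)
def pvTypeId (d : List (String × String)) : String := PySem.Dict.getD (PySem.Dict.mk d) "TYPE_ID" ""

def find_top_deal_type (deals : List (List (String × String))) : Option (List (String × String)) :=
  -- for sort in sort_1: for deal in deals: if deal['TYPE_ID'] == sort: return deal   (and again for sort_2, sort_3)
  match pvSort1.findSome? (fun sort => deals.find? (fun deal => pvTypeId deal == sort)) with
  | some deal => some deal
  | none =>
    match pvSort2.findSome? (fun sort => deals.find? (fun deal => pvTypeId deal == sort)) with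
    | some deal => some deal
    | none => pvSort3.findSome? (fun sort => deals.find? (fun deal => pvTypeId deal == sort))

-- ===== PORT B =====
def find_top_deal_type_alt (deals : List (List (String × String))) : Option (List (String × String)) :=
  -- priority = {t: i for i, t in enumerate(sort_1 + sort_2 + sort_3)}
  let priority : PySem.Dict String Int :=
    (pvSort1 ++ pvSort2 ++ pvSort3).zipIdx.foldl (fun d p => d.insert p.1 (p.2 : Int)) PySem.Dict.empty
  -- single pass: best = None; best_rank = len(priority); strict < keeps the first deal of equal rank
  (deals.foldl
    (fun st deal =>
      match priority.get? (pvTypeId deal) with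
      | some r => if r < st.2 then (some deal, r) else st
      | none => st)
    ((none : Option (List (String × String))), (priority.size : Int))).1

-- ===== PRECONDITION & SPEC =====
-- Pre_ excludes deal lists in which some deal lacks the 'TYPE_ID' key: Python raises KeyError on such a
-- deal, except that A can short-circuit on an earlier match and return before reaching it while B's
-- single pass still raises.
def Pre_find_top_deal_type (deals : List (List (String × String))) : Prop :=
  ∀ d ∈ deals, (PySem.Dict.mk d).contains "TYPE_ID" = true
instance (deals : List (List (String × String))) : Decidable (Pre_find_top_deal_type deals) := by
  unfold Pre_find_top_deal_type; infer_instance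
def pvWitness_find_top_deal_type : (List (List (String × String))) :=
  [[("TYPE_ID", "UC_ZKPT1B")], [("TYPE_ID", "UC_XIYCTV"), ("STAGE", "WON")]]

def Spec_find_top_deal_type (deals : List (List (String × String))) (out : Option (List (String × String))) : Prop := out = find_top_deal_type_alt deals
instance (deals : List (List (String × String))) (out : Option (List (String × String))) : Decidable (Spec_find_top_deal_type deals out) := by unfold Spec_find_top_deal_type; infer_instance

-- ===== CLAIM (what is proved, stated in full; the proofs are below) =====
def Claim_equal_find_top_deal_type : Prop := ∀ (deals : List (List (String × String))), Dom_find_top_deal_type deals → Pre_find_top_deal_type deals → Spec_find_top_deal_type deals (find_top_deal_type deals)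

-- ===== LEMMAS AND PROOFS =====
-- the full priority order, the rank of a deal in it (= 11 when absent), and B's dict/step
def pvS : List String := pvSort1 ++ pvSort2 ++ pvSort3
def pvRk (d : List (String × String)) : Nat := pvS.findIdx (fun s => s == pvTypeId d)
def pvP : PySem.Dict String Int :=
  pvS.zipIdx.foldl (fun d p => d.insert p.1 (p.2 : Int)) PySem.Dict.empty
def pvStep (st : Option (List (String × String)) × Int) (deal : List (String × String)) :
    Option (List (String × String)) × Int :=
  match pvP.get? (pvTypeId deal) with
  | some r => if r < st.2 then (some deal, r) else st
  | none => st

-- `g n ds`: the deal the remaining loop selects when the current best rank is n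
def pvG : Nat → List (List (String × String)) → Option (List (String × String))
  | _, [] => none
  | n, d :: ds => if pvRk d < n then some ((pvG (pvRk d) ds).getD d) else pvG n ds

lemma pvP_get? (k : String) :
    pvP.get? k = if pvS.findIdx (fun s => s == k) < 11 then some ((pvS.findIdx (fun s => s == k) : Nat) : Int) else none := by
  have h : pvP = PySem.Dict.mk [("UC_XIYCTV",0),("UC_5T4MAW",1),("UC_2SJOEJ",2),("UC_81T8ZR",3),("UC_SV60SP",4),("UC_N113M9",5),("UC_ZKPT1B",6),("UC_92H9MN",7),("UC_7V8HWF",8),("UC_HT9G9H",9),("UC_1UPOTU",10)] := by decide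
  rw [h]
  simp only [pvS, pvSort1, pvSort2, pvSort3, List.cons_append, List.nil_append,
    List.findIdx_cons, PySem.Dict.get?_mk_cons, Bool.cond_eq_ite]
  by_cases h1 : ("UC_XIYCTV" == k) = true
  · simp [h1]
  by_cases h2 : ("UC_5T4MAW" == k) = true
  · simp [h1, h2]
  by_cases h3 : ("UC_2SJOEJ" == k) = true
  · simp [h1, h2, h3]
  by_cases h4 : ("UC_81T8ZR" == k) = true
  · simp [h1, h2, h3, h4]
  by_cases h5 : ("UC_SV60SP" == k) = true
  · simp [h1, h2, h3, h4, h5]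
  by_cases h6 : ("UC_N113M9" == k) = true
  · simp [h1, h2, h3, h4, h5, h6]
  by_cases h7 : ("UC_ZKPT1B" == k) = true
  · simp [h1, h2, h3, h4, h5, h6, h7]
  by_cases h8 : ("UC_92H9MN" == k) = true
  · simp [h1, h2, h3, h4, h5, h6, h7, h8]
  by_cases h9 : ("UC_7V8HWF" == k) = true
  · simp [h1, h2, h3, h4, h5, h6, h7, h8, h9]
  by_cases h10 : ("UC_HT9G9H" == k) = true
  · simp [h1, h2, h3, h4, h5, h6, h7, h8, h9, h10]
  by_cases h11 : ("UC_1UPOTU" == k) = true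
  · simp [h1, h2, h3, h4, h5, h6, h7, h8, h9, h10, h11]
  simp [h1, h2, h3, h4, h5, h6, h7, h8, h9, h10, h11, PySem.Dict.get?]

-- findSome? congruence on members
lemma pvFindSome_ext {α β : Type} {f g : α → Option β} :
    ∀ (L : List α), (∀ s ∈ L, f s = g s) → L.findSome? f = L.findSome? g := by
  intro L
  induction L with
  | nil => intro _; rfl
  | cons a L ih =>
    intro h
    rw [List.findSome?_cons, List.findSome?_cons, h a (List.mem_cons_self), ih (fun s hs => h s (List.mem_cons_of_mem a hs))]

lemma pvFindSome (ds : List (List (String × String))) :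
    ∀ n, n ≤ 11 → (pvS.take n).findSome? (fun s => ds.find? (fun d => pvTypeId d == s)) = pvG n ds := by
  induction ds with
  | nil =>
    intro n _
    simp [pvG, List.find?_nil]
  | cons d ds ih =>
    intro n hn
    have hlen : pvS.length = 11 := by decide
    by_cases hlt : pvRk d < n
    · -- split take n at position pvRk d
      have hS : pvRk d < pvS.length := by omega
      have hget : pvS[pvRk d] = pvTypeId d := by
        have := List.findIdx_getElem (p := fun s => s == pvTypeId d) (xs := pvS) (w := hS)
        simpa using this
      have hsplit : pvS.take n = pvS.take (pvRk d) ++ (pvTypeId d :: List.take (n - pvRk d - 1) (pvS.drop (pvRk d + 1))) := by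
        have hstep : pvS.take n = pvS.take (pvRk d) ++ List.take (n - pvRk d) (pvS.drop (pvRk d)) := by
          rw [← List.take_add]; congr 1; omega
        rw [hstep]
        obtain ⟨m, hm⟩ : ∃ m, n - pvRk d = m + 1 := ⟨n - pvRk d - 1, by omega⟩
        rw [hm, List.drop_eq_getElem_cons hS, hget, List.take_succ_cons]
        simp
      rw [hsplit, List.findSome?_append]
      have hpre : (pvS.take (pvRk d)).findSome? (fun s => (d :: ds).find? (fun e => pvTypeId e == s))
          = (pvS.take (pvRk d)).findSome? (fun s => ds.find? (fun e => pvTypeId e == s)) := by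
        apply pvFindSome_ext
        intro s hs
        obtain ⟨j, hj, rfl⟩ := List.mem_take_iff_getElem.mp hs
        have hjr : j < pvRk d := by omega
        have hne := List.not_of_lt_findIdx (p := fun s => s == pvTypeId d) (xs := pvS) (i := j) (by simpa [pvRk] using hjr)
        rw [List.find?_cons]
        have : (pvTypeId d == pvS[j]) = false := by
          simp only [beq_eq_false_iff_ne] at hne ⊢
          exact fun h => hne h.symm
        simp [this]
      rw [hpre, ih (pvRk d) (by omega)]
      rw [List.findSome?_cons]
      have hhead : (d :: ds).find? (fun e => pvTypeId e == pvTypeId d) = some d := by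
        rw [List.find?_cons]
        simp
      rw [hhead]
      simp only [pvG, if_pos hlt]
      cases hg : pvG (pvRk d) ds <;> simp
    · -- every element of take n is before the first occurrence
      have hpre : (pvS.take n).findSome? (fun s => (d :: ds).find? (fun e => pvTypeId e == s))
          = (pvS.take n).findSome? (fun s => ds.find? (fun e => pvTypeId e == s)) := by
        apply pvFindSome_ext
        intro s hs
        obtain ⟨j, hj, rfl⟩ := List.mem_take_iff_getElem.mp hs
        have hjr : j < pvRk d := by omega
        have hne := List.not_of_lt_findIdx (p := fun s => s == pvTypeId d) (xs := pvS) (i := j) (by simpa [pvRk] using hjr)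
        rw [List.find?_cons]
        have : (pvTypeId d == pvS[j]) = false := by
          simp only [beq_eq_false_iff_ne] at hne ⊢
          exact fun h => hne h.symm
        simp [this]
      rw [hpre, ih n hn]
      simp only [pvG, if_neg hlt]

lemma pvFold (ds : List (List (String × String))) :
    ∀ (b : Option (List (String × String))) (n : Nat), n ≤ 11 →
      ds.foldl pvStep (b, (n : Int)) =
        (match pvG n ds with
         | none => (b, (n : Int))
         | some e => (some e, (pvRk e : Int))) := by
  induction ds with
  | nil => intro b n _; simp [pvG]
  | cons d ds ih =>
    intro b n hn
    have hstep : pvStep (b, (n : Int)) d =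
        (if pvRk d < n then (some d, (pvRk d : Int)) else (b, (n : Int))) := by
      unfold pvStep
      rw [pvP_get?]
      by_cases h11 : pvS.findIdx (fun s => s == pvTypeId d) < 11
      · simp only [h11, if_true, pvRk]
        by_cases hlt : pvS.findIdx (fun s => s == pvTypeId d) < n
        · simp [hlt, Int.ofNat_lt.mpr hlt]
        · have : ¬ ((pvS.findIdx (fun s => s == pvTypeId d) : Int) < (n : Int)) := by
            exact_mod_cast hlt
          simp [hlt, this]
      · have : ¬ pvRk d < n := by unfold pvRk; omega
        simp [h11, this]
    rw [List.foldl_cons, hstep]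
    by_cases hlt : pvRk d < n
    · rw [if_pos hlt]
      have := ih (some d) (pvRk d) (by unfold pvRk at hlt ⊢; omega)
      rw [this]
      simp only [pvG, if_pos hlt]
      cases hg : pvG (pvRk d) ds <;> simp
    · rw [if_neg hlt]
      rw [ih b n hn]
      simp only [pvG, if_neg hlt]

lemma pvB_eq (deals : List (List (String × String))) : find_top_deal_type_alt deals = pvG 11 deals := by
  have h : find_top_deal_type_alt deals = (deals.foldl pvStep ((none : Option (List (String × String))), ((11 : Nat) : Int))).1 := by
    rfl
  rw [h, pvFold deals none 11 (le_refl _)]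
  cases hg : pvG 11 deals <;> simp

lemma pvA_eq (deals : List (List (String × String))) : find_top_deal_type deals = pvG 11 deals := by
  have h11 : pvS.take 11 = pvS := by decide
  have hmain := pvFindSome deals 11 (le_refl _)
  rw [h11] at hmain
  rw [show pvS = pvSort1 ++ (pvSort2 ++ pvSort3) from by simp [pvS]] at hmain
  rw [List.findSome?_append, List.findSome?_append] at hmain
  unfold find_top_deal_type
  rw [← hmain]
  cases pvSort1.findSome? (fun sort => deals.find? (fun deal => pvTypeId deal == sort)) <;>
  cases pvSort2.findSome? (fun sort => deals.find? (fun deal => pvTypeId deal == sort)) <;>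
  simp [Option.or]

-- ===== VERDICT (by name: the statement is the Claim_ definition above) =====
theorem find_top_deal_type_spec : Claim_equal_find_top_deal_type := by
  intro deals _ _
  unfold Spec_find_top_deal_type
  rw [pvA_eq, pvB_eq]
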